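-- pv_equiv track=rewrite | github.com/CyberdyneCorp/obsidian_mcp_rest_server | app/domain/services/tag_parser.py | parse_hierarchical_tag
-- ===== SOURCE A (Python) =====
-- def parse_hierarchical_tag(tag: str) -> list[str]:
--     """Parse a hierarchical tag into all parent tags.
--
--     Example: "#projects/ai/ml" -> ["#projects", "#projects/ai", "#projects/ai/ml"]
--
--     Args:
--         tag: Tag string (with or without # prefix)
--
--     Returns:
--         List of tags from root to leaf
--     """
--     clean_tag = tag.lstrip("#")
--     parts = clean_tag.split("/")
--
--     result = []
--     current = ""
--     for part in parts:
--         if current: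
--             current = f"{current}/{part}"
--         else:
--             current = part
--         result.append(f"#{current}")
--
--     return result
-- ===== SOURCE B (Python) =====
-- def parse_hierarchical_tag(tag: str) -> list[str]:
--     """Parse a hierarchical tag into all parent tags (root to leaf)."""
--     parts = tag.lstrip("#").split("/")
--     return ["#" + "/".join(parts[:i + 1]) for i in range(len(parts))]
-- ===== Notes on version B (the rewrite author's own statement) =====
-- stated objective: simpler
-- what changed: Drops the running 'current' accumulator and its truthiness branch: each parent tag is computed directly as '#' + '/'.join of an increasing prefix slice of the split parts.
-- intended difference: On tags whose cleaned form (after stripping leading '#') starts with '/', A's falsy-accumulator check silently swallows the leading empty segment (e.g. '#/a' -> ['#', '#a']) while B faithfully keeps every segment of the split ('#/a' -> ['#', '#/a']); B's value is the intended one since each entry should be '#' plus an exact prefix of the tag's segments. — e.g. on parse_hierarchical_tag("#/a"): A returns ["#", "#a"], B returns ["#", "#/a"]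
import Mathlib
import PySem

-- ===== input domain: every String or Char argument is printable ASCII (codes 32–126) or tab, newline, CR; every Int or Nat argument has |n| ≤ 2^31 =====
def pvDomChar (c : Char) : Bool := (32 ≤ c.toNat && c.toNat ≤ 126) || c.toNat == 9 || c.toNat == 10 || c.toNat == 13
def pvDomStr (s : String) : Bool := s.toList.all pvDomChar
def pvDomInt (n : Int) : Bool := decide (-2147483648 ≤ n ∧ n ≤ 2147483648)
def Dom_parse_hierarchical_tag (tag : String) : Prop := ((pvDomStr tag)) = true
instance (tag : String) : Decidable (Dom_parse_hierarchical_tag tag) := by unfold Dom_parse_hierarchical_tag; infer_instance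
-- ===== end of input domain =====

-- B replaces A's running 'current' accumulator (and its truthiness branch) by computing each
-- parent tag directly as '#' + '/'.join of an increasing prefix of the split parts (objective:
-- simpler); on cleaned tags starting with '/' the two intentionally differ (see D_ below).

-- ===== PORT A =====
-- tag.lstrip("#") ported by hand: for the one-character strip set "#" it drops exactly the
-- leading '#' characters, which is List.dropWhile (· = '#') on the code points — exact.
def pvStepA (st : List (List Char) × List Char) (part : List Char) : List (List Char) × List Char :=
  -- 'if current: current = f"{current}/{part}" else: current = part; result.append(f"#{current}")'
  let current := if st.2 ≠ [] then st.2 ++ '/' :: part else part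
  (st.1 ++ ['#' :: current], current)

def parse_hierarchical_tag (tag : String) : List String :=
  let parts := PySem.Chars.splitOn (tag.toList.dropWhile (· = '#')) ['/']
  ((parts.foldl pvStepA ([], [])).1).map String.ofList

-- ===== PORT B =====
-- '[ "#" + "/".join(parts[:i+1]) for i in range(len(parts)) ]'; parts[:i+1] is List.take (i+1).
def parse_hierarchical_tag_alt (tag : String) : List String :=
  let parts := PySem.Chars.splitOn (tag.toList.dropWhile (· = '#')) ['/']
  (List.range parts.length).map (fun i => String.ofList ('#' :: PySem.Chars.join ['/'] (parts.take (i + 1))))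

-- ===== PRECONDITION & SPEC =====
-- On tags whose cleaned form (after stripping leading '#') starts with '/', A's falsy-accumulator
-- check swallows the leading empty segment ('#/a' -> ["#", "#a"]) while B keeps every segment of
-- the split ('#/a' -> ["#", "#/a"]); B's value is the intended one: each entry is '#' plus an
-- exact prefix of the tag's segments.
def D_parse_hierarchical_tag (tag : String) : Prop :=
  '/' ∈ tag.toList ∧ ∀ c ∈ tag.toList.takeWhile (· ≠ '/'), c = '#'
instance (tag : String) : Decidable (D_parse_hierarchical_tag tag) := by unfold D_parse_hierarchical_tag; infer_instance

def Spec_parse_hierarchical_tag (tag : String) (out : List String) : Prop :=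
  ¬ D_parse_hierarchical_tag tag → out = parse_hierarchical_tag_alt tag
instance (tag : String) (out : List String) : Decidable (Spec_parse_hierarchical_tag tag out) := by unfold Spec_parse_hierarchical_tag; infer_instance

def pvDiffWitness_parse_hierarchical_tag : String := "#/a"
def pvDiffWitnessOut_parse_hierarchical_tag : (List String) × (List String) := (["#", "#a"], ["#", "#/a"])

-- ===== CLAIM (what is proved, stated in full; the proofs are below) =====
def Claim_unchanged_parse_hierarchical_tag : Prop := ∀ (tag : String), Dom_parse_hierarchical_tag tag → Spec_parse_hierarchical_tag tag (parse_hierarchical_tag tag)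
def Claim_changed_parse_hierarchical_tag : Prop := Dom_parse_hierarchical_tag (pvDiffWitness_parse_hierarchical_tag) ∧ D_parse_hierarchical_tag (pvDiffWitness_parse_hierarchical_tag) ∧ parse_hierarchical_tag (pvDiffWitness_parse_hierarchical_tag) = pvDiffWitnessOut_parse_hierarchical_tag.1 ∧ parse_hierarchical_tag_alt (pvDiffWitness_parse_hierarchical_tag) = pvDiffWitnessOut_parse_hierarchical_tag.2 ∧ pvDiffWitnessOut_parse_hierarchical_tag.1 ≠ pvDiffWitnessOut_parse_hierarchical_tag.2
def Claim_exact_parse_hierarchical_tag : Prop := ∀ (tag : String), Dom_parse_hierarchical_tag tag → D_parse_hierarchical_tag tag → parse_hierarchical_tag tag ≠ parse_hierarchical_tag_alt tag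

-- ===== LEMMAS AND PROOFS =====

-- Shape of splitOn.go: the pieces already in 'acc' are a reversed prefix of the result, and the
-- piece being built ('cur', reversed) is a prefix of the next emitted piece.
theorem pvGoShape (fuel : Nat) : ∀ (l cur : List Char) (acc : List (List Char)),
    ∃ p rest, PySem.Chars.splitOn.go ['/'] fuel l cur acc = acc.reverse ++ (cur.reverse ++ p) :: rest := by
  induction fuel with
  | zero =>
    intro l cur acc
    exact ⟨l, [], by simp [PySem.Chars.splitOn.go]⟩
  | succ fuel ih =>
    intro l cur acc
    cases l with
    | nil => exact ⟨[], [], by simp [PySem.Chars.splitOn.go]⟩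
    | cons c rest =>
      by_cases hc : c = '/'
      · subst hc
        obtain ⟨p, r, hp⟩ := ih rest [] (cur.reverse :: acc)
        refine ⟨[], p :: r, ?_⟩
        have hstep : PySem.Chars.splitOn.go ['/'] (fuel+1) ('/' :: rest) cur acc
            = PySem.Chars.splitOn.go ['/'] fuel rest [] (cur.reverse :: acc) := by
          simp [PySem.Chars.splitOn.go, List.isPrefixOf]
        rw [hstep, hp]
        simp
      · obtain ⟨p, r, hp⟩ := ih rest (c :: cur) acc
        refine ⟨c :: p, r, ?_⟩
        have hstep : PySem.Chars.splitOn.go ['/'] (fuel+1) (c :: rest) cur acc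
            = PySem.Chars.splitOn.go ['/'] fuel rest (c :: cur) acc := by
          simp only [PySem.Chars.splitOn.go, List.isPrefixOf]
          simp
          exact fun h' => absurd h'.symm hc
        rw [hstep, hp]
        simp

-- splitOn of a list starting with a non-separator character: the first piece starts with it.
theorem pvSplitOnHead (c : Char) (cs : List Char) (hc : c ≠ '/') :
    ∃ p rest, PySem.Chars.splitOn (c :: cs) ['/'] = (c :: p) :: rest := by
  have hstep : PySem.Chars.splitOn (c :: cs) ['/']
      = PySem.Chars.splitOn.go ['/'] (cs.length + 1) cs [c] [] := by
    simp only [PySem.Chars.splitOn, List.length_cons]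
    simp only [PySem.Chars.splitOn.go, List.isPrefixOf]
    simp
    exact fun h' => absurd h'.symm hc
  obtain ⟨p, r, hp⟩ := pvGoShape (cs.length + 1) cs [c] []
  rw [hstep, hp]
  exact ⟨p, r, by simp⟩

-- D_ restated on the side the proofs use: the cleaned tag starts with '/'.
theorem pvD_iff_aux (l : List Char) :
    ('/' ∈ l ∧ ∀ c ∈ l.takeWhile (· ≠ '/'), c = '#') ↔ (l.dropWhile (· = '#')).head? = some '/' := by
  induction l with
  | nil => simp
  | cons c t ih =>
    by_cases hsl : c = '/'
    · subst hsl; simp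
    · by_cases hh : c = '#'
      · subst hh
        simpa [List.takeWhile, List.dropWhile, hsl] using ih
      · rw [List.dropWhile_cons, if_neg (by simp [hh]), List.takeWhile_cons, if_pos (by simp [hsl])]
        simp only [List.head?_cons, Option.some.injEq]
        constructor
        · rintro ⟨_, hall⟩
          exact absurd (hall c (by simp)) hh
        · intro h
          exact absurd h hsl

theorem pvD_iff (tag : String) :
    D_parse_hierarchical_tag tag ↔ (tag.toList.dropWhile (· = '#')).head? = some '/' :=
  pvD_iff_aux tag.toList

-- join absorbs the first separator: join sep (a :: b :: t) = join sep ((a ++ sep ++ b) :: t).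
theorem pvJoinMerge (sep a b : List Char) (t : List (List Char)) :
    PySem.Chars.join sep (a :: b :: t) = PySem.Chars.join sep ((a ++ sep ++ b) :: t) := by
  cases t with
  | nil => simp [PySem.Chars.join_cons_cons, PySem.Chars.join_singleton]
  | cons x xs =>
    rw [PySem.Chars.join_cons_cons, PySem.Chars.join_cons_cons, PySem.Chars.join_cons_cons]
    simp [List.append_assoc]

-- join swallows a glued-on first separator segment.
theorem pvJoinStep (cur p : List Char) (t : List (List Char)) :
    PySem.Chars.join ['/'] ((cur ++ '/' :: p) :: t) = cur ++ '/' :: PySem.Chars.join ['/'] (p :: t) := by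
  have h : (cur ++ '/' :: p : List Char) = cur ++ ['/'] ++ p := by simp
  rw [h, ← pvJoinMerge, PySem.Chars.join_cons_cons]
  simp

-- A's loop, once 'current' is nonempty, produces exactly the '#'-prefixed joins of the prefixes.
theorem pvFoldA (rest : List (List Char)) : ∀ (acc : List (List Char)) (cur : List Char), cur ≠ [] →
    (rest.foldl pvStepA (acc, cur)).1
      = acc ++ (List.range rest.length).map
          (fun i => '#' :: PySem.Chars.join ['/'] (cur :: rest.take (i + 1))) := by
  induction rest with
  | nil => intro acc cur _; simp
  | cons p rest' ih =>
    intro acc cur hcur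
    have hstep : pvStepA (acc, cur) p = (acc ++ ['#' :: (cur ++ '/' :: p)], cur ++ '/' :: p) := by
      simp [pvStepA, hcur]
    have hne : cur ++ '/' :: p ≠ [] := by simp
    rw [List.foldl_cons, hstep, ih _ _ hne]
    simp [List.range_succ_eq_map, List.take_succ_cons, pvJoinStep,
          PySem.Chars.join_cons_cons, PySem.Chars.join_singleton]

-- A's loop result is always an extension of the accumulator passed in.
theorem pvFoldPrefix (l : List (List Char)) : ∀ (acc : List (List Char)) (cur : List Char),
    ∃ t, (l.foldl pvStepA (acc, cur)).1 = acc ++ t := by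
  induction l with
  | nil => intro acc cur; exact ⟨[], by simp⟩
  | cons p l' ih =>
    intro acc cur
    by_cases hcur : cur = []
    · obtain ⟨t, ht⟩ := ih (acc ++ ['#' :: p]) p
      refine ⟨('#' :: p) :: t, ?_⟩
      rw [List.foldl_cons]
      have hstep : pvStepA (acc, cur) p = (acc ++ ['#' :: p], p) := by simp [pvStepA, hcur]
      rw [hstep, ht]; simp
    · obtain ⟨t, ht⟩ := ih (acc ++ ['#' :: (cur ++ '/' :: p)]) (cur ++ '/' :: p)
      refine ⟨('#' :: (cur ++ '/' :: p)) :: t, ?_⟩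
      rw [List.foldl_cons]
      have hstep : pvStepA (acc, cur) p = (acc ++ ['#' :: (cur ++ '/' :: p)], cur ++ '/' :: p) := by
        simp [pvStepA, hcur]
      rw [hstep, ht]; simp

-- ===== VERDICT (by name: the statement is the Claim_ definition above) =====
theorem parse_hierarchical_tag_spec : Claim_unchanged_parse_hierarchical_tag := by
  intro tag _ hD
  unfold parse_hierarchical_tag parse_hierarchical_tag_alt
  cases hclean : tag.toList.dropWhile (· = '#') with
  | nil => decide
  | cons c cs =>
    have hc : c ≠ '/' := by
      intro h; exact hD ((pvD_iff tag).mpr (by rw [hclean, h]; rfl))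
    obtain ⟨p, rest, hsplit⟩ := pvSplitOnHead c cs hc
    simp only [hsplit]
    have hfirst : pvStepA ([], []) (c :: p) = (['#' :: (c :: p)], c :: p) := by
      simp [pvStepA]
    rw [List.foldl_cons, hfirst, pvFoldA rest ['#' :: (c :: p)] (c :: p) (by simp)]
    simp [List.range_succ_eq_map, List.take_succ_cons, PySem.Chars.join_singleton]

theorem parse_hierarchical_tag_changed : Claim_changed_parse_hierarchical_tag := by
  unfold Claim_changed_parse_hierarchical_tag
  refine ⟨by decide, ?_, by decide, by decide, by decide⟩
  unfold pvDiffWitness_parse_hierarchical_tag D_parse_hierarchical_tag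
  simp

theorem parse_hierarchical_tag_tight : Claim_exact_parse_hierarchical_tag := by
  intro tag _ hD heq
  replace hD := (pvD_iff tag).mp hD
  unfold parse_hierarchical_tag parse_hierarchical_tag_alt at heq
  obtain ⟨cs, hclean⟩ : ∃ cs, tag.toList.dropWhile (· = '#') = '/' :: cs := by
    cases h : tag.toList.dropWhile (· = '#') with
    | nil => rw [h] at hD; simp at hD
    | cons c cs => rw [h] at hD; simp at hD; exact ⟨cs, by rw [hD]⟩
  rw [hclean] at heq
  obtain ⟨p, r, hsplit⟩ : ∃ p r, PySem.Chars.splitOn ('/' :: cs) ['/'] = [] :: p :: r := by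
    have hstep : PySem.Chars.splitOn ('/' :: cs) ['/']
        = PySem.Chars.splitOn.go ['/'] (cs.length + 1) cs [] [[]] := by
      simp only [PySem.Chars.splitOn, List.length_cons]
      simp [PySem.Chars.splitOn.go, List.isPrefixOf]
    obtain ⟨p, r, hp⟩ := pvGoShape (cs.length + 1) cs [] [[]]
    exact ⟨p, r, by rw [hstep, hp]; simp⟩
  rw [hsplit] at heq
  -- A's element at index 1 is '#' :: p; B's is '#' :: '/' :: p
  have hA2 : pvStepA (pvStepA ([], []) []) p = ([['#'], '#' :: p], p) := by simp [pvStepA]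
  obtain ⟨t, ht⟩ := pvFoldPrefix r [['#'], '#' :: p] p
  have hAget : (((([] :: p :: r).foldl pvStepA ([], [])).1).map String.ofList)[1]? = some (String.ofList ('#' :: p)) := by
    rw [List.foldl_cons, List.foldl_cons, hA2, ht]
    simp
  have hBget : ((List.range ([] :: p :: r).length).map
      (fun i => String.ofList ('#' :: PySem.Chars.join ['/'] (([] :: p :: r).take (i + 1)))))[1]?
        = some (String.ofList ('#' :: '/' :: p)) := by
    rw [List.getElem?_map, List.getElem?_range (by simp)]
    simp [PySem.Chars.join_cons_cons, PySem.Chars.join_singleton]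
  rw [heq, hBget] at hAget
  have h2 := congrArg String.toList (Option.some.inj hAget)
  simp at h2
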